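-- pv_equiv track=rewrite | github.com/RonaldReddy024/ai-coo | app/services/task_logic.py | detect_phase
-- ===== SOURCE A (Python) =====
-- def detect_phase(text: str) -> str:
--     text = text.lower()
--     if any(k in text for k in ["prd", "spec", "design", "requirements", "architecture"]):
--         return "design"
--     if any(k in text for k in ["implement", "develop", "build", "code", "integration"]):
--         return "build"
--     if any(k in text for k in ["test", "qa", "validate", "bug", "regression"]):
--         return "test"
--     if any(k in text for k in ["deploy", "release", "launch", "rollout", "go live"]):
--         return "launch"
--     return "unknown"
-- ===== SOURCE B (Python) =====
-- KEYWORD_RANK = {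
--     "prd": 0, "spec": 0, "design": 0, "requirements": 0, "architecture": 0,
--     "implement": 1, "develop": 1, "build": 1, "code": 1, "integration": 1,
--     "test": 2, "qa": 2, "validate": 2, "bug": 2, "regression": 2,
--     "deploy": 3, "release": 3, "launch": 3, "rollout": 3, "go live": 3,
-- }
-- PHASE_NAMES = ["design", "build", "test", "launch"]
--
-- # index the keywords by first character, so the scan only probes keywords that can start here
-- BY_FIRST = {}
-- for k, r in KEYWORD_RANK.items():
--     BY_FIRST[k[0]] = BY_FIRST.get(k[0], []) + [(k, r)]
--
-- def detect_phase(text: str) -> str: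
--     t = text.lower()
--     best = 4
--     for i, c in enumerate(t):
--         for k, r in BY_FIRST.get(c, []):
--             if r < best and t.startswith(k, i):
--                 best = r
--     return PHASE_NAMES[best] if best < 4 else "unknown"
-- ===== Notes on version B (the rewrite author's own statement) =====
-- stated objective: alternative
-- what changed: Instead of running a substring search per keyword inside four phase branches, B makes one left-to-right scan over the text positions, probing at each position only the keywords filed under that position's character in a first-character index, and keeps the minimum matched phase rank, mapping it back to a phase name at the end.
import Mathlib
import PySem

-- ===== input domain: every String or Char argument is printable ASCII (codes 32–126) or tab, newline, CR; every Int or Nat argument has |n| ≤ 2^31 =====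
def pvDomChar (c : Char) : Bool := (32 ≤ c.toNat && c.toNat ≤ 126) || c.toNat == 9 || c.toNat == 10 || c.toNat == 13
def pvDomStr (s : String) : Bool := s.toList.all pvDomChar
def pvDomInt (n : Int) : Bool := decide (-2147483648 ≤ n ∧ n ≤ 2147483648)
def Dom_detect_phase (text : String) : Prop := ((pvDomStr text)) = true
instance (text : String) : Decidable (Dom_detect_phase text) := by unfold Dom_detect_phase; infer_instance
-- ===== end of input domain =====

-- B replaces A's per-keyword substring searches by a single left-to-right scan over the text
-- positions, probing at each position only the keywords indexed under that position's first
-- character and keeping the minimum matched phase rank (alternative algorithm; same value).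

-- ===== PORT A =====
def detect_phase (text : String) : String :=
  let text := PySem.Str.lower text
  if ["prd", "spec", "design", "requirements", "architecture"].any (fun k => PySem.Str.isIn k text) then "design"
  else if ["implement", "develop", "build", "code", "integration"].any (fun k => PySem.Str.isIn k text) then "build"
  else if ["test", "qa", "validate", "bug", "regression"].any (fun k => PySem.Str.isIn k text) then "test"
  else if ["deploy", "release", "launch", "rollout", "go live"].any (fun k => PySem.Str.isIn k text) then "launch"
  else "unknown"

-- ===== PORT B =====
-- KEYWORD_RANK (a dict with distinct keys, iterated in insertion order) as an association list
def pvKeywordRank : List (String × Nat) :=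
  [("prd", 0), ("spec", 0), ("design", 0), ("requirements", 0), ("architecture", 0),
   ("implement", 1), ("develop", 1), ("build", 1), ("code", 1), ("integration", 1),
   ("test", 2), ("qa", 2), ("validate", 2), ("bug", 2), ("regression", 2),
   ("deploy", 3), ("release", 3), ("launch", 3), ("rollout", 3), ("go live", 3)]

def pvPhaseNames : List String := ["design", "build", "test", "launch"]

-- BY_FIRST, built exactly as in Source B by folding over the table
-- (k[0] is ported as k.toList.headI: every key of the table is nonempty, so this is exact)
def pvByFirst : PySem.Dict Char (List (String × Nat)) :=
  pvKeywordRank.foldl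
    (fun d kr => d.insert kr.1.toList.headI (d.getD kr.1.toList.headI [] ++ [kr]))
    PySem.Dict.empty

-- the body of Source B's inner loop: `if r < best and t.startswith(k, i): best = r`
-- (t.startswith(k, i) for the indices 0 ≤ i < len(t) produced by enumerate is exactly
-- startswith on the suffix of t from i)
def pvStep (t : String) (i : Int) (best : Nat) (kr : String × Nat) : Nat :=
  if kr.2 < best && PySem.Chars.startswith (t.toList.drop i.toNat) kr.1.toList then kr.2 else best

-- the inner loop over BY_FIRST.get(c, [])
def pvInner (t : String) (i : Int) (c : Char) (best : Nat) : Nat :=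
  (pvByFirst.getD c []).foldl (pvStep t i) best

-- the outer loop `for i, c in enumerate(t)`, starting from best = 4
def pvScan (t : String) : Nat :=
  (PySem.List.enumerate t.toList).foldl (fun best ic => pvInner t ic.1 ic.2 best) 4

def detect_phase_alt (text : String) : String :=
  let t := PySem.Str.lower text
  let best := pvScan t
  if best < 4 then pvPhaseNames.getD best "unknown" else "unknown"

-- ===== PRECONDITION & SPEC =====
def Spec_detect_phase (text : String) (out : String) : Prop := out = detect_phase_alt text
instance (text : String) (out : String) : Decidable (Spec_detect_phase text out) := by
  unfold Spec_detect_phase; infer_instance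

-- ===== CLAIM =====
def Claim_equal_detect_phase : Prop :=
  ∀ (text : String), Dom_detect_phase text → Spec_detect_phase text (detect_phase text)

-- ===== LEMMAS AND PROOFS =====

-- generic facts about a contracting foldl over a Nat accumulator
lemma pvFoldl_le {α : Type} (f : Nat → α → Nat) (hf : ∀ b x, f b x ≤ b) :
    ∀ (l : List α) (b : Nat), l.foldl f b ≤ b := by
  intro l
  induction l with
  | nil => intro b; exact le_refl b
  | cons x l ih => intro b; exact le_trans (ih (f b x)) (hf b x)

lemma pvFoldl_hit {α : Type} (f : Nat → α → Nat) (hf : ∀ b x, f b x ≤ b)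
    (x : α) (r : Nat) (hx : ∀ b, f b x ≤ r) :
    ∀ (l : List α) (b : Nat), x ∈ l → l.foldl f b ≤ r := by
  intro l
  induction l with
  | nil => intro b h; cases h
  | cons y l ih =>
    intro b h
    rcases List.mem_cons.mp h with h | h
    · subst h
      exact le_trans (pvFoldl_le f hf l (f b x)) (hx b)
    · exact ih (f b y) h

lemma pvFoldl_attain {α : Type} (f : Nat → α → Nat) (Q : α → Nat → Prop)
    (hf : ∀ b x, f b x = b ∨ Q x (f b x)) :
    ∀ (l : List α) (b : Nat), l.foldl f b = b ∨ ∃ x ∈ l, Q x (l.foldl f b) := by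
  intro l
  induction l with
  | nil => intro b; exact Or.inl rfl
  | cons x l ih =>
    intro b
    rcases ih (f b x) with h | ⟨y, hy, hQ⟩
    · rcases hf b x with h' | h'
      · left; rw [List.foldl_cons, h, h']
      · right; exact ⟨x, List.mem_cons_self, by rw [List.foldl_cons, h]; exact h'⟩
    · right; exact ⟨y, List.mem_cons_of_mem _ hy, hQ⟩

lemma pvStep_le (t : String) (i : Int) (b : Nat) (kr : String × Nat) :
    pvStep t i b kr ≤ b := by
  unfold pvStep
  split
  · next h => rw [Bool.and_eq_true] at h; have := h.1; simp at this; omega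
  · exact le_refl b

lemma pvInner_le (t : String) (i : Int) (c : Char) (b : Nat) : pvInner t i c b ≤ b :=
  pvFoldl_le _ (pvStep_le t i) _ b

-- the fold building BY_FIRST evaluates to this literal table
lemma pvByFirst_items : pvByFirst.items =
    [('p', [("prd", 0)]), ('s', [("spec", 0)]),
     ('d', [("design", 0), ("develop", 1), ("deploy", 3)]),
     ('r', [("requirements", 0), ("regression", 2), ("release", 3), ("rollout", 3)]),
     ('a', [("architecture", 0)]),
     ('i', [("implement", 1), ("integration", 1)]),
     ('b', [("build", 1), ("bug", 2)]), ('c', [("code", 1)]),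
     ('t', [("test", 2)]), ('q', [("qa", 2)]), ('v', [("validate", 2)]),
     ('l', [("launch", 3)]), ('g', [("go live", 3)])] := by
  decide

-- every entry of any bucket of BY_FIRST is an entry of the table
lemma pvBucket_sound (c : Char) (kr : String × Nat)
    (h : kr ∈ pvByFirst.getD c []) : kr ∈ pvKeywordRank := by
  rw [PySem.Dict.getD_eq_get?_getD] at h
  rcases hf : List.find? (fun p => p.1 == c) pvByFirst.items with _ | e
  · simp only [PySem.Dict.get?, hf, Option.map_none, Option.getD_none] at h
    cases h
  · have he := List.mem_of_find?_eq_some hf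
    simp only [PySem.Dict.get?, hf, Option.map_some, Option.getD_some] at h
    rw [pvByFirst_items] at he
    fin_cases he <;> (fin_cases h <;> decide)

-- the scan result is bounded by the rank of any (nonempty, bucketed) keyword occurring in t
lemma pvScan_le (t k : String) (r : Nat)
    (hb : (k, r) ∈ pvByFirst.getD k.toList.headI [])
    (hk : k.toList ≠ []) (h : PySem.Str.isIn k t = true) :
    pvScan t ≤ r := by
  rw [PySem.Str.isIn_eq, ← PySem.Chars.exists_prefix_drop_iff_isIn] at h
  obtain ⟨j, hj⟩ := h
  rcases hkl : k.toList with _ | ⟨kh, ktl⟩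
  · exact absurd hkl hk
  rw [hkl] at hj
  obtain ⟨s, hs⟩ := hj
  have hdrop : t.toList.drop j = kh :: (ktl ++ s) := by rw [← hs]; simp
  have hjlt : j < t.toList.length := by
    by_contra hge
    rw [List.drop_eq_nil_of_le (by omega)] at hdrop
    exact List.cons_ne_nil _ _ hdrop.symm
  have hget : t.toList[j]'hjlt = kh := by
    have h0 : (t.toList.drop j)[0]'(by rw [hdrop]; simp) = kh := by simp [hdrop]
    rw [List.getElem_drop] at h0
    simpa using h0
  have hxmem : ((j : Int), kh) ∈ PySem.List.enumerate t.toList := by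
    rw [PySem.List.mem_enumerate_iff]
    exact ⟨j, hjlt, by rw [hget]; simp⟩
  unfold pvScan
  refine pvFoldl_hit _ (fun b ic => pvInner_le t ic.1 ic.2 b) ((j : Int), kh) r ?_ _ _ hxmem
  intro b
  unfold pvInner
  have hbk : (k, r) ∈ pvByFirst.getD kh [] := by
    have hh : k.toList.headI = kh := by rw [hkl]; rfl
    rwa [hh] at hb
  refine pvFoldl_hit _ (pvStep_le t (j : Int)) (k, r) r ?_ _ _ hbk
  intro b
  unfold pvStep
  have hsw : PySem.Chars.startswith (t.toList.drop ((j : Int)).toNat) k.toList = true := by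
    rw [PySem.Chars.startswith_iff]
    have : ((j : Int)).toNat = j := by simp
    rw [this, hkl, hdrop]
    exact ⟨s, by simp⟩
  simp only [hsw, Bool.and_true]
  split
  · next h' => simp at h'; omega
  · next h' => simp at h'; omega

-- the scan result is either 4 or the rank of some table keyword occurring in t
lemma pvScan_cases (t : String) :
    pvScan t = 4 ∨ ∃ k r, (k, r) ∈ pvKeywordRank ∧ PySem.Str.isIn k t = true ∧ pvScan t = r := by
  have hinner : ∀ (b : Nat) (ic : Int × Char),
      pvInner t ic.1 ic.2 b = b ∨
      ∃ kr ∈ pvByFirst.getD ic.2 [],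
        PySem.Chars.startswith (t.toList.drop ic.1.toNat) kr.1.toList = true ∧
        pvInner t ic.1 ic.2 b = kr.2 := by
    intro b ic
    refine pvFoldl_attain _
      (fun kr v => PySem.Chars.startswith (t.toList.drop ic.1.toNat) kr.1.toList = true ∧ v = kr.2)
      ?_ (pvByFirst.getD ic.2 []) b
    intro b kr
    unfold pvStep
    split
    · next h => right; rw [Bool.and_eq_true] at h; exact ⟨h.2, rfl⟩
    · left; rfl
  have houter := pvFoldl_attain (fun best ic => pvInner t ic.1 ic.2 best)
    (fun ic v => ∃ kr ∈ pvByFirst.getD ic.2 [],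
        PySem.Chars.startswith (t.toList.drop ic.1.toNat) kr.1.toList = true ∧ v = kr.2)
    hinner (PySem.List.enumerate t.toList) 4
  rcases houter with h4 | ⟨ic, _, kr, hkr, hsw, hv⟩
  · left; exact h4
  · right
    refine ⟨kr.1, kr.2, pvBucket_sound ic.2 kr hkr, ?_, hv⟩
    rw [PySem.Str.isIn_eq, ← PySem.Chars.exists_prefix_drop_iff_isIn]
    exact ⟨ic.1.toNat, (PySem.Chars.startswith_iff _ _).mp hsw⟩

-- reverse mapping: an entry of the table lies in exactly one of A's four keyword lists
lemma pvRank_mem (k : String) (r : Nat) (h : (k, r) ∈ pvKeywordRank) :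
    (r = 0 ∧ k ∈ (["prd", "spec", "design", "requirements", "architecture"] : List String)) ∨
    (r = 1 ∧ k ∈ (["implement", "develop", "build", "code", "integration"] : List String)) ∨
    (r = 2 ∧ k ∈ (["test", "qa", "validate", "bug", "regression"] : List String)) ∨
    (r = 3 ∧ k ∈ (["deploy", "release", "launch", "rollout", "go live"] : List String)) := by
  simp only [pvKeywordRank, List.mem_cons, List.not_mem_nil, or_false, Prod.mk.injEq] at h
  simp only [List.mem_cons, List.not_mem_nil, or_false]
  tauto

lemma pvMem_rank0 (k : String) (h : k ∈ (["prd", "spec", "design", "requirements", "architecture"] : List String)) :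
    (k, 0) ∈ pvByFirst.getD k.toList.headI [] ∧ k.toList ≠ [] := by
  fin_cases h <;> decide

lemma pvMem_rank1 (k : String) (h : k ∈ (["implement", "develop", "build", "code", "integration"] : List String)) :
    (k, 1) ∈ pvByFirst.getD k.toList.headI [] ∧ k.toList ≠ [] := by
  fin_cases h <;> decide

lemma pvMem_rank2 (k : String) (h : k ∈ (["test", "qa", "validate", "bug", "regression"] : List String)) :
    (k, 2) ∈ pvByFirst.getD k.toList.headI [] ∧ k.toList ≠ [] := by
  fin_cases h <;> decide

lemma pvMem_rank3 (k : String) (h : k ∈ (["deploy", "release", "launch", "rollout", "go live"] : List String)) :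
    (k, 3) ∈ pvByFirst.getD k.toList.headI [] ∧ k.toList ≠ [] := by
  fin_cases h <;> decide

-- ===== VERDICT =====
set_option maxHeartbeats 1000000 in
theorem detect_phase_spec : Claim_equal_detect_phase := by
  intro text _
  unfold Spec_detect_phase
  simp only [detect_phase, detect_phase_alt]
  set t := PySem.Str.lower text with ht
  by_cases h0 : (["prd", "spec", "design", "requirements", "architecture"].any (fun k => PySem.Str.isIn k t)) = true
  · obtain ⟨k, hkmem, hkin⟩ := List.any_eq_true.mp h0
    obtain ⟨hmem, hne⟩ := pvMem_rank0 k hkmem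
    have hle := pvScan_le t k 0 hmem hne hkin
    have hs : pvScan t = 0 := by omega
    rw [if_pos h0, hs]
    decide
  · by_cases h1 : (["implement", "develop", "build", "code", "integration"].any (fun k => PySem.Str.isIn k t)) = true
    · obtain ⟨k, hkmem, hkin⟩ := List.any_eq_true.mp h1
      obtain ⟨hmem, hne⟩ := pvMem_rank1 k hkmem
      have hle := pvScan_le t k 1 hmem hne hkin
      have hne0 : pvScan t ≠ 0 := by
        intro hz
        rcases pvScan_cases t with h4 | ⟨k', r, hmem', hin', hr⟩
        · omega
        · rcases pvRank_mem k' r hmem' with ⟨hr0, hg⟩ | ⟨hr1, _⟩ | ⟨hr2, _⟩ | ⟨hr3, _⟩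
          · exact h0 (List.any_eq_true.mpr ⟨k', hg, hin'⟩)
          all_goals omega
      have hs : pvScan t = 1 := by omega
      rw [if_neg h0, if_pos h1, hs]
      decide
    · by_cases h2 : (["test", "qa", "validate", "bug", "regression"].any (fun k => PySem.Str.isIn k t)) = true
      · obtain ⟨k, hkmem, hkin⟩ := List.any_eq_true.mp h2
        obtain ⟨hmem, hne⟩ := pvMem_rank2 k hkmem
        have hle := pvScan_le t k 2 hmem hne hkin
        have hlow : pvScan t ≠ 0 ∧ pvScan t ≠ 1 := by
          constructor <;> intro hz <;>
          · rcases pvScan_cases t with h4 | ⟨k', r, hmem', hin', hr⟩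
            · omega
            · rcases pvRank_mem k' r hmem' with ⟨hr0, hg⟩ | ⟨hr1, hg⟩ | ⟨hr2, _⟩ | ⟨hr3, _⟩
              · exact h0 (List.any_eq_true.mpr ⟨k', hg, hin'⟩)
              · exact h1 (List.any_eq_true.mpr ⟨k', hg, hin'⟩)
              all_goals omega
        have hs : pvScan t = 2 := by omega
        rw [if_neg h0, if_neg h1, if_pos h2, hs]
        decide
      · by_cases h3 : (["deploy", "release", "launch", "rollout", "go live"].any (fun k => PySem.Str.isIn k t)) = true
        · obtain ⟨k, hkmem, hkin⟩ := List.any_eq_true.mp h3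
          obtain ⟨hmem, hne⟩ := pvMem_rank3 k hkmem
          have hle := pvScan_le t k 3 hmem hne hkin
          have hlow : pvScan t ≠ 0 ∧ pvScan t ≠ 1 ∧ pvScan t ≠ 2 := by
            refine ⟨?_, ?_, ?_⟩ <;> intro hz <;>
            · rcases pvScan_cases t with h4 | ⟨k', r, hmem', hin', hr⟩
              · omega
              · rcases pvRank_mem k' r hmem' with ⟨hr0, hg⟩ | ⟨hr1, hg⟩ | ⟨hr2, hg⟩ | ⟨hr3, _⟩
                · exact h0 (List.any_eq_true.mpr ⟨k', hg, hin'⟩)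
                · exact h1 (List.any_eq_true.mpr ⟨k', hg, hin'⟩)
                · exact h2 (List.any_eq_true.mpr ⟨k', hg, hin'⟩)
                all_goals omega
          have hs : pvScan t = 3 := by omega
          rw [if_neg h0, if_neg h1, if_neg h2, if_pos h3, hs]
          decide
        · have hs : pvScan t = 4 := by
            rcases pvScan_cases t with h4 | ⟨k', r, hmem', hin', hr⟩
            · exact h4
            · rcases pvRank_mem k' r hmem' with ⟨hr0, hg⟩ | ⟨hr1, hg⟩ | ⟨hr2, hg⟩ | ⟨hr3, hg⟩
              · exact absurd (List.any_eq_true.mpr ⟨k', hg, hin'⟩) h0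
              · exact absurd (List.any_eq_true.mpr ⟨k', hg, hin'⟩) h1
              · exact absurd (List.any_eq_true.mpr ⟨k', hg, hin'⟩) h2
              · exact absurd (List.any_eq_true.mpr ⟨k', hg, hin'⟩) h3
          rw [if_neg h0, if_neg h1, if_neg h2, if_neg h3, hs]
          decide
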